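-- pv_equiv track=rewrite | github.com/dr-lux/AdventOfCode2020 | Day08/AOC_Day08.py | check
-- ===== SOURCE A (Python) =====
-- def check(pos_to_change,instruction_list):
--     used_instruction_list = list()
--     pos_arg = 0
--     # Execution of the instruction with modification
--     while(True):
--         # List the used instruction
--         used_instruction_list.append(pos_arg)
--         splited_arg = instruction_list[pos_arg].split(" ")
--         # Jmp statement
--         if splited_arg[0] == "jmp":
--             # Jmp to change to a nop statement
--             if pos_to_change == pos_arg:
--                 pos_arg += 1
--             # Normal jmp statement
--             else:
--                 pos_arg += int(splited_arg[1])
--         # Nop statement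
--         elif splited_arg[0] == "nop":
--             # Nop to change to a jmp statement
--             if pos_to_change == pos_arg:
--                 pos_arg += int(splited_arg[1])
--             # Normal nop statement
--             else:
--                 pos_arg += 1
--         # Acc statement
--         else:
--             pos_arg += 1
--         # Infinite loop statement
--         if pos_arg in used_instruction_list:
--             return(False)
--         # Correction execution statement
--         if pos_arg == len(instruction_list):
--             return(True)
-- ===== SOURCE B (Python) =====
-- def check(pos_to_change, instruction_list):
--     # Loop detection by pigeonhole step budget: run at most 2*len steps of the
--     # (lazily decoded) swapped program; reaching the end means success, exhausting
--     # the budget means the deterministic trajectory must have cycled.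
--     n = len(instruction_list)
--
--     def step(pos):
--         parts = instruction_list[pos].split(" ")
--         effective_jump = (parts[0] == "nop") if pos == pos_to_change else (parts[0] == "jmp")
--         return pos + int(parts[1]) if effective_jump else pos + 1
--
--     pos = 0
--     for _ in range(2 * n):
--         pos = step(pos)
--         if pos == n:
--             return True
--     return False
-- ===== Notes on version B (the rewrite author's own statement) =====
-- stated objective: faster
-- what changed: B keeps no visited collection at all: it detects the infinite loop by pigeonhole, running the lazily-decoded swapped program for at most 2*len(instruction_list) steps and reporting success only if the end is reached, instead of A's per-step visited list with an O(visited) membership scan.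
-- outside the precondition, e.g. on check(-1, ['jmp 2', 'jmp x']): A returns True, B returns True; on check(-1, ['jmp -1', 'nop 0']): A returns False, B returns False; on check(0, ['nop x']): A raises ValueError, B raises ValueError
import Mathlib
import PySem

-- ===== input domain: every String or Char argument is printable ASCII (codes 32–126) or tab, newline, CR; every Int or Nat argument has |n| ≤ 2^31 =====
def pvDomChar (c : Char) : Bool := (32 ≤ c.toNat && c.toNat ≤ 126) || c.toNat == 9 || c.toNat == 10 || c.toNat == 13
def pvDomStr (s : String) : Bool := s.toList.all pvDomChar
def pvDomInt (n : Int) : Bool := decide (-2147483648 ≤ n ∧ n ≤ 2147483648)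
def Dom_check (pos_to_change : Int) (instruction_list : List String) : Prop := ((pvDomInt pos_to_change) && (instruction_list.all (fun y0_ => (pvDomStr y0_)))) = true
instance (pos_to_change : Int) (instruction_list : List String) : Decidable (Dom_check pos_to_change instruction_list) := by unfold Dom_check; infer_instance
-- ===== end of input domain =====

-- B drops A's visited list entirely: it runs the same lazily-decoded swapped program for at most
-- 2*len steps (pigeonhole: a longer run must have revisited a position, hence cycles forever),
-- returning True only if the end is reached; equivalence is proved on Pre_check below.

-- ===== PORT A =====
-- one iteration's decode of A (split + branch ladder); none = where Python raises ValueError/IndexError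
def checkStep (pos_to_change : Int) (pos_arg : Int) (instr : String) : Option Int :=
  let splited_arg := PySem.Chars.splitOn instr.toList " ".toList
  if splited_arg.headD [] == "jmp".toList then
    if pos_to_change == pos_arg then some (pos_arg + 1)
    else match splited_arg[1]? with
         | none => none
         | some a => (PySem.Int.ofChars? a).map (fun k => pos_arg + k)
  else if splited_arg.headD [] == "nop".toList then
    if pos_to_change == pos_arg then
      match splited_arg[1]? with
      | none => none
      | some a => (PySem.Int.ofChars? a).map (fun k => pos_arg + k)
    else some (pos_arg + 1)
  else some (pos_arg + 1)

-- A's while-True loop with its used_instruction_list; fuel (length+1) is enough because on every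
-- input admitted by Pre_check the recorded positions are pairwise distinct members of [0, length);
-- the `none`/fuel-0 branches (Python raising) return an arbitrary false outside Pre_check.
def checkLoop (pos_to_change : Int) (instruction_list : List String) :
    Nat → List Int → Int → Bool
  | 0, _, _ => false
  | fuel+1, used_instruction_list, pos_arg =>
    let used_instruction_list := used_instruction_list ++ [pos_arg]
    match PySem.List.pyGet? instruction_list pos_arg with
    | none => false
    | some instr =>
      match checkStep pos_to_change pos_arg instr with
      | none => false
      | some pos_arg' =>
        if used_instruction_list.contains pos_arg' then false
        else if pos_arg' == (instruction_list.length : Int) then true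
        else checkLoop pos_to_change instruction_list fuel used_instruction_list pos_arg'

def check (pos_to_change : Int) (instruction_list : List String) : Bool :=
  checkLoop pos_to_change instruction_list (instruction_list.length + 1) [] 0

-- ===== PORT B =====
-- B's step helper: lazily decode the instruction at pos (with the swap applied) and return the
-- next position; none = where Python's indexing/int() raises
def altStep (pos_to_change : Int) (instruction_list : List String) (pos : Int) : Option Int :=
  match PySem.List.pyGet? instruction_list pos with
  | none => none
  | some line =>
    let parts := PySem.Chars.splitOn line.toList " ".toList
    let effective_jump :=
      if pos == pos_to_change then parts.headD [] == "nop".toList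
      else parts.headD [] == "jmp".toList
    if effective_jump then
      match parts[1]? with
      | none => none
      | some a => (PySem.Int.ofChars? a).map (fun k => pos + k)
    else some (pos + 1)

-- B's `for _ in range(2*n)` budget loop: no visited structure, just a countdown
def altLoop (pos_to_change : Int) (instruction_list : List String) :
    Nat → Int → Bool
  | 0, _ => false
  | budget+1, pos =>
    match altStep pos_to_change instruction_list pos with
    | none => false
    | some pos' =>
      if pos' == (instruction_list.length : Int) then true
      else altLoop pos_to_change instruction_list budget pos'

def check_alt (pos_to_change : Int) (instruction_list : List String) : Bool :=
  altLoop pos_to_change instruction_list (2 * instruction_list.length) 0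

-- ===== PRECONDITION & SPEC =====
-- per-line closed-form check: a line that is effectively a jump (a `jmp` not swapped, or a `nop`
-- swapped at pos_to_change) must carry a parseable integer argument targeting [0, length]
def instrOk (pos_to_change : Int) (n : Nat) (i : Nat) (line : String) : Bool :=
  let parts := PySem.Chars.splitOn line.toList " ".toList
  if (parts.headD [] == "jmp".toList && !(pos_to_change == (i : Int)))
      || (parts.headD [] == "nop".toList && pos_to_change == (i : Int)) then
    match parts[1]? with
    | none => false
    | some a =>
      match PySem.Int.ofChars? a with
      | none => false
      | some k => decide (0 ≤ (i : Int) + k ∧ (i : Int) + k ≤ (n : Int))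
  else true

-- Pre_check requires a nonempty program whose every effectively-jumping line carries a parseable
-- integer argument targeting [0, length].  Whether A actually raises on an excluded input
-- (ValueError/IndexError) or still returns depends on which lines the run reaches and on Python's
-- negative-index wraparound — a property of the execution, not a closed-form input condition — so
-- Pre_check conservatively demands every line be executable; B parses lazily exactly like A and
-- returns the same value on every excluded input on which A returns.
def Pre_check (pos_to_change : Int) (instruction_list : List String) : Prop :=
  instruction_list ≠ [] ∧
  (instruction_list.zipIdx.all
    (fun p => instrOk pos_to_change instruction_list.length p.2 p.1)) = true
instance (pos_to_change : Int) (instruction_list : List String) : Decidable (Pre_check pos_to_change instruction_list) := by unfold Pre_check; infer_instance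

def pvWitness_check : Int × List String := (1, ["nop 2", "acc +1"])

def Spec_check (pos_to_change : Int) (instruction_list : List String) (out : Bool) : Prop := out = check_alt pos_to_change instruction_list
instance (pos_to_change : Int) (instruction_list : List String) (out : Bool) : Decidable (Spec_check pos_to_change instruction_list out) := by unfold Spec_check; infer_instance

-- ===== CLAIM (what is proved, stated in full; the proofs are below) =====
def Claim_equal_check : Prop := ∀ (pos_to_change : Int) (instruction_list : List String), Dom_check pos_to_change instruction_list → Pre_check pos_to_change instruction_list → Spec_check pos_to_change instruction_list (check pos_to_change instruction_list)

-- ===== LEMMAS AND PROOFS =====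

-- total per-line displacement of the (swapped) instruction at position pos, used only in proofs
def stepF (pos_to_change : Int) (pos : Int) (line : String) : Int :=
  let parts := PySem.Chars.splitOn line.toList " ".toList
  if (if pos == pos_to_change then parts.headD [] == "nop".toList
      else parts.headD [] == "jmp".toList) then
    (PySem.Int.ofChars? (parts[1]?.getD [])).getD 0
  else 1

-- total one-step transition: absorbing outside [0, length)
def stepD (pos_to_change : Int) (instruction_list : List String) (pos : Int) : Int :=
  if 0 ≤ pos ∧ pos < (instruction_list.length : Int) then
    stepF pos_to_change pos (instruction_list.getD pos.toNat "")
  else 0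

-- the trajectory of the deterministic machine
def trajF (pos_to_change : Int) (instruction_list : List String) : Nat → Int
  | 0 => 0
  | k+1 => trajF pos_to_change instruction_list k
            + stepD pos_to_change instruction_list (trajF pos_to_change instruction_list k)

set_option maxRecDepth 8192 in
lemma decode (ptc : Int) (ls : List String) (i : Nat) (hi : i < ls.length)
    (h : instrOk ptc ls.length i ls[i] = true) :
    checkStep ptc (i : Int) ls[i] = some ((i : Int) + stepD ptc ls (i : Int)) ∧
    altStep ptc ls (i : Int) = some ((i : Int) + stepD ptc ls (i : Int)) ∧
    0 ≤ (i : Int) + stepD ptc ls (i : Int) ∧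
    (i : Int) + stepD ptc ls (i : Int) ≤ (ls.length : Int) := by
  have hget : ls.getD ((i : Int)).toNat "" = ls[i] := by
    simp [List.getD_eq_getElem?_getD, hi]
  have hD : stepD ptc ls (i : Int) = stepF ptc (i : Int) ls[i] := by
    unfold stepD
    rw [if_pos (by constructor <;> [positivity; exact_mod_cast hi]), hget]
  rw [hD]
  unfold instrOk at h
  unfold checkStep altStep stepF
  have hA : PySem.List.pyGet? ls (i : Int) = some ls[i] := by
    rw [PySem.List.pyGet?_natCast]; simp [hi]
  rw [hA]
  have hsy : (ptc == (i:Int)) = ((i:Int) == ptc) := by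
    by_cases he : (i:Int) = ptc <;> simp [he, Ne.symm]
  rw [hsy]
  by_cases hj : (PySem.Chars.splitOn ls[i].toList " ".toList).headD [] = "jmp".toList <;>
  by_cases hn : (PySem.Chars.splitOn ls[i].toList " ".toList).headD [] = "nop".toList <;>
  by_cases he : (i:Int) = ptc <;>
  rcases h1 : (PySem.Chars.splitOn ls[i].toList " ".toList)[1]? with _ | a <;>
  simp_all <;> try omega
  all_goals (rcases h2 : PySem.Int.ofChars? a with _ | k <;> simp_all <;> try omega)

-- pigeonhole: an injective, never-terminal trajectory prefix fits in [0, length)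
lemma pigeon (ptc : Int) (ls : List String) (k : Nat)
    (hinj : ∀ i j, i ≤ k → j ≤ k → trajF ptc ls i = trajF ptc ls j → i = j)
    (hlt : ∀ j ≤ k, 0 ≤ trajF ptc ls j ∧ trajF ptc ls j < (ls.length : Int)) :
    k + 1 ≤ ls.length := by
  have hsub : (Finset.range (k+1)).image (trajF ptc ls) ⊆ Finset.Ico (0:Int) (ls.length : Int) := by
    intro x hx
    obtain ⟨j, hj, rfl⟩ := Finset.mem_image.1 hx
    have hjk : j ≤ k := Nat.lt_succ_iff.1 (Finset.mem_range.1 hj)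
    have := hlt j hjk
    exact Finset.mem_Ico.2 ⟨this.1, this.2⟩
  have hcard : ((Finset.range (k+1)).image (trajF ptc ls)).card = k + 1 := by
    rw [Finset.card_image_of_injOn, Finset.card_range]
    intro a ha b hb hab
    exact hinj a b (by simpa using Nat.lt_succ_iff.1 (Finset.mem_range.1 ha)) (by simpa using Nat.lt_succ_iff.1 (Finset.mem_range.1 hb)) hab
  have := Finset.card_le_card hsub
  rw [hcard] at this
  simpa using this

-- determinism: equal positions have equal futures
lemma det (ptc : Int) (ls : List String) (a b : Nat)
    (h : trajF ptc ls a = trajF ptc ls b) :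
    ∀ t, trajF ptc ls (a + t) = trajF ptc ls (b + t) := by
  intro t
  induction t with
  | zero => simpa using h
  | succ t ih =>
    have ha : a + (t+1) = (a + t) + 1 := by omega
    have hb : b + (t+1) = (b + t) + 1 := by omega
    rw [ha, hb, trajF, trajF, ih]

-- a revisit before reaching the end means the end is never reached
lemma cycle (ptc : Int) (ls : List String) (j k : Nat) (hjk : j ≤ k)
    (hrep : trajF ptc ls (k+1) = trajF ptc ls j)
    (hne : ∀ i ≤ k, trajF ptc ls i ≠ (ls.length : Int)) :
    ∀ m, trajF ptc ls m ≠ (ls.length : Int) := by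
  intro m
  induction m using Nat.strong_induction_on with
  | _ m ih =>
    by_cases hm : m ≤ k
    · exact hne m hm
    · have hshift := det ptc ls (k+1) j hrep (m - (k+1))
      have h1 : k + 1 + (m - (k+1)) = m := by omega
      have h2 : j + (m - (k+1)) < m := by omega
      rw [h1] at hshift
      rw [hshift]
      exact ih _ h2

-- B's budget loop computes "the trajectory reaches length within the budget"
lemma altLoop_iff (ptc : Int) (ls : List String)
    (hpre : ∀ (i : Nat) (hi : i < ls.length), instrOk ptc ls.length i ls[i] = true) :
    ∀ (budget k : Nat), 0 ≤ trajF ptc ls k → trajF ptc ls k < (ls.length : Int) →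
      (altLoop ptc ls budget (trajF ptc ls k) = true ↔
        ∃ t, 1 ≤ t ∧ t ≤ budget ∧ trajF ptc ls (k + t) = (ls.length : Int)) := by
  intro budget
  induction budget with
  | zero =>
    intro k _ _
    simp only [altLoop]
    constructor
    · intro h; exact absurd h (by simp)
    · rintro ⟨t, ht1, ht2, -⟩; omega
  | succ budget ih =>
    intro k h0 hlt
    obtain ⟨i, hik⟩ : ∃ i : Nat, (i : Int) = trajF ptc ls k := ⟨(trajF ptc ls k).toNat, by omega⟩
    have hi : i < ls.length := by omega
    have hd := decode ptc ls i hi (hpre i hi)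
    rw [hik] at hd
    have hnext : trajF ptc ls k + stepD ptc ls (trajF ptc ls k) = trajF ptc ls (k+1) := rfl
    rw [hnext] at hd
    obtain ⟨-, hB, hge, hle⟩ := hd
    rw [altLoop, hB]
    dsimp only
    by_cases hend : trajF ptc ls (k+1) = (ls.length : Int)
    · rw [if_pos (by simpa using hend)]
      exact ⟨fun _ => ⟨1, le_rfl, by omega, hend⟩, fun _ => rfl⟩
    · rw [if_neg (by simpa using hend)]
      rw [ih (k+1) hge (lt_of_le_of_ne hle hend)]
      constructor
      · rintro ⟨t, ht1, ht2, ht3⟩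
        exact ⟨t+1, by omega, by omega, by rw [show k+(t+1) = k+1+t by omega]; exact ht3⟩
      · rintro ⟨t, ht1, ht2, ht3⟩
        rcases Nat.eq_or_lt_of_le ht1 with h1 | h1
        · exact absurd (by rw [← h1] at ht3; simpa using ht3) hend
        · exact ⟨t-1, by omega, by omega, by rw [show k+1+(t-1) = k+t by omega]; exact ht3⟩

-- A's visited-list loop computes "the trajectory ever reaches length"
lemma checkLoop_iff (ptc : Int) (ls : List String)
    (hpre : ∀ (i : Nat) (hi : i < ls.length), instrOk ptc ls.length i ls[i] = true) :
    ∀ (fuel k : Nat), ls.length + 1 ≤ fuel + k →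
      (∀ j ≤ k, trajF ptc ls j ≠ (ls.length : Int)) →
      (∀ i j, i ≤ k → j ≤ k → trajF ptc ls i = trajF ptc ls j → i = j) →
      (∀ j ≤ k, 0 ≤ trajF ptc ls j ∧ trajF ptc ls j < (ls.length : Int)) →
      (checkLoop ptc ls fuel ((List.range k).map (trajF ptc ls)) (trajF ptc ls k) = true ↔
        ∃ m, trajF ptc ls m = (ls.length : Int)) := by
  intro fuel
  induction fuel with
  | zero =>
    intro k hfuel hne hinj hbound
    exact absurd (pigeon ptc ls k hinj hbound) (by omega)
  | succ fuel ih =>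
    intro k hfuel hne hinj hbound
    obtain ⟨i, hik⟩ : ∃ i : Nat, (i : Int) = trajF ptc ls k :=
      ⟨(trajF ptc ls k).toNat, by have := hbound k le_rfl; omega⟩
    have hi : i < ls.length := by have := hbound k le_rfl; omega
    have hd := decode ptc ls i hi (hpre i hi)
    rw [hik] at hd
    have hnext : trajF ptc ls k + stepD ptc ls (trajF ptc ls k) = trajF ptc ls (k+1) := rfl
    rw [hnext] at hd
    obtain ⟨hA, -, hge, hle⟩ := hd
    have hget : PySem.List.pyGet? ls (trajF ptc ls k) = some ls[i] := by
      rw [← hik, PySem.List.pyGet?_natCast]; simp [hi]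
    have happ : (List.range k).map (trajF ptc ls) ++ [trajF ptc ls k]
        = (List.range (k+1)).map (trajF ptc ls) := by
      rw [List.range_succ, List.map_append, List.map_cons, List.map_nil]
    rw [checkLoop]
    rw [hget]
    dsimp only
    rw [hA]
    dsimp only
    rw [happ]
    have hcont : ((List.range (k+1)).map (trajF ptc ls)).contains (trajF ptc ls (k+1))
        = decide (∃ j ≤ k, trajF ptc ls (k+1) = trajF ptc ls j) := by
      simp only [List.contains_eq_mem, List.mem_map, List.mem_range, Nat.lt_succ_iff]
      simp [eq_comm]
    rw [hcont]
    by_cases hrep : ∃ j ≤ k, trajF ptc ls (k+1) = trajF ptc ls j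
    · rw [if_pos (by simpa using hrep)]
      obtain ⟨j, hjk, hj⟩ := hrep
      exact iff_of_false (by simp) (by
        rintro ⟨m, hm⟩
        exact cycle ptc ls j k hjk hj hne m hm)
    · rw [if_neg (by simpa using hrep)]
      by_cases hend : trajF ptc ls (k+1) = (ls.length : Int)
      · rw [if_pos (by simpa using hend)]
        exact iff_of_true rfl ⟨k+1, hend⟩
      · rw [if_neg (by simpa using hend)]
        refine ih (k+1) (by omega) ?_ ?_ ?_
        · intro j hj
          rcases Nat.lt_succ_iff_lt_or_eq.1 (Nat.lt_succ_of_le hj) with h | h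
          · exact hne j (by omega)
          · subst h; exact hend
        · intro a b ha hb hab
          rcases Nat.le_succ_iff.1 ha with ha' | ha' <;> rcases Nat.le_succ_iff.1 hb with hb' | hb'
          · exact hinj a b ha' hb' hab
          · subst hb'; exact absurd (⟨a, ha', hab.symm⟩ : ∃ j ≤ k, trajF ptc ls (k+1) = trajF ptc ls j) hrep
          · subst ha'; exact absurd (⟨b, hb', hab⟩ : ∃ j ≤ k, trajF ptc ls (k+1) = trajF ptc ls j) hrep
          · omega
        · intro j hj
          rcases Nat.le_succ_iff.1 hj with h | h
          · exact hbound j h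
          · subst h; exact ⟨hge, lt_of_le_of_ne hle hend⟩

-- under Pre_check the trajectory stays in [0, length] until it first hits length
lemma traj_bounds (ptc : Int) (ls : List String)
    (hpre : ∀ (i : Nat) (hi : i < ls.length), instrOk ptc ls.length i ls[i] = true) :
    ∀ k, (∀ j, j < k → trajF ptc ls j ≠ (ls.length : Int)) →
      0 ≤ trajF ptc ls k ∧ trajF ptc ls k ≤ (ls.length : Int) := by
  intro k
  induction k with
  | zero => intro _; simp [trajF]
  | succ k ih =>
    intro h
    have hk := ih (fun j hj => h j (by omega))
    have hklt : trajF ptc ls k < (ls.length : Int) :=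
      lt_of_le_of_ne hk.2 (h k (by omega))
    obtain ⟨i, hik⟩ : ∃ i : Nat, (i : Int) = trajF ptc ls k := ⟨(trajF ptc ls k).toNat, by omega⟩
    have hi : i < ls.length := by omega
    have hd := decode ptc ls i hi (hpre i hi)
    rw [hik] at hd
    have hnext : trajF ptc ls k + stepD ptc ls (trajF ptc ls k) = trajF ptc ls (k+1) := rfl
    rw [hnext] at hd
    exact ⟨hd.2.2.1, hd.2.2.2⟩

-- if the end is reached at all, it is reached within length steps
lemma reach_bound (ptc : Int) (ls : List String) (m : Nat)
    (hpre : ∀ (i : Nat) (hi : i < ls.length), instrOk ptc ls.length i ls[i] = true)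
    (hm : trajF ptc ls m = (ls.length : Int)) (hne : ls ≠ []) :
    ∃ t, 1 ≤ t ∧ t ≤ 2 * ls.length ∧ trajF ptc ls t = (ls.length : Int) := by
  have hP : ∃ t, trajF ptc ls t = (ls.length : Int) := ⟨m, hm⟩
  have hm0 : trajF ptc ls (Nat.find hP) = (ls.length : Int) := Nat.find_spec hP
  have hmin : ∀ j, j < Nat.find hP → trajF ptc ls j ≠ (ls.length : Int) :=
    fun j hj => Nat.find_min hP hj
  have hn1 : 1 ≤ ls.length := by
    rcases ls with _ | _ <;> simp_all
  have h1 : 1 ≤ Nat.find hP := by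
    by_contra h
    have h0 : Nat.find hP = 0 := by omega
    rw [h0] at hm0
    simp only [trajF] at hm0
    omega
  have key : ∀ a b, a < b → b < Nat.find hP → trajF ptc ls a = trajF ptc ls b → False := by
    intro a b hab hbm heq
    have hdet := det ptc ls a b heq (Nat.find hP - b)
    rw [show b + (Nat.find hP - b) = Nat.find hP by omega, hm0] at hdet
    exact hmin (a + (Nat.find hP - b)) (by omega) hdet
  have hinj : ∀ a b, a ≤ Nat.find hP - 1 → b ≤ Nat.find hP - 1 →
      trajF ptc ls a = trajF ptc ls b → a = b := by
    intro a b ha hb heq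
    rcases lt_trichotomy a b with h | h | h
    · exact absurd heq (fun e => key a b h (by omega) e)
    · exact h
    · exact absurd heq.symm (fun e => key b a h (by omega) e)
  have hbound : ∀ j, j ≤ Nat.find hP - 1 →
      0 ≤ trajF ptc ls j ∧ trajF ptc ls j < (ls.length : Int) := by
    intro j hj
    have hb := traj_bounds ptc ls hpre j (fun i hi => hmin i (by omega))
    exact ⟨hb.1, lt_of_le_of_ne hb.2 (hmin j (by omega))⟩
  have hle := pigeon ptc ls (Nat.find hP - 1) hinj hbound
  exact ⟨Nat.find hP, h1, by omega, hm0⟩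

-- ===== VERDICT (by name: the statement is the Claim_ definition above) =====
theorem check_spec : Claim_equal_check := by
  intro ptc ls _ hpre
  obtain ⟨hne, hall⟩ := hpre
  have hpre' : ∀ (i : Nat) (hi : i < ls.length), instrOk ptc ls.length i ls[i] = true := by
    intro i hi
    have hm : (ls[i], i) ∈ ls.zipIdx := by
      rw [List.mem_zipIdx_iff_getElem?]
      simp [hi]
    have h2 := (List.all_eq_true.1 hall) _ hm
    simpa only [] using h2
  have hn1 : 1 ≤ ls.length := by rcases ls with _ | _ <;> simp_all
  have htraj0 : trajF ptc ls 0 = 0 := rfl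
  have hA := checkLoop_iff ptc ls hpre' (ls.length + 1) 0 (by omega)
    (by intro j hj; interval_cases j; rw [htraj0]; omega)
    (by intro a b ha hb _; omega)
    (by intro j hj; interval_cases j; rw [htraj0]; constructor <;> omega)
  simp only [List.range_zero, List.map_nil, htraj0] at hA
  have hB := altLoop_iff ptc ls hpre' (2 * ls.length) 0
    (by rw [htraj0]) (by rw [htraj0]; omega)
  simp only [htraj0, Nat.zero_add] at hB
  unfold Spec_check check check_alt
  rw [Bool.eq_iff_iff, hA, hB]
  constructor
  · rintro ⟨m, hm⟩
    exact reach_bound ptc ls m hpre' hm hne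
  · rintro ⟨t, -, -, ht⟩
    exact ⟨t, ht⟩
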